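-- pv_equiv track=rewrite | github.com/jgdelrio/tutorials | HackerRank/array_pairs.py | solve_just1s
-- ===== SOURCE A (Python) =====
-- def solve_just1s(arr, m=None):
--     counter = 0
--
--     # Get max and divide list
--     m = max(arr)
--     idx = arr.index(m)
--     left = arr[:idx]
--     right = arr[idx+1:]
--
--     n_left = len(left)
--     n_right = len(right)
--
--     # Count 1's and update counter
--     if n_left == 0:
--         counter += right.count(1)           # pairs with the max
--         if n_right == 2:
--             counter += (1 in right)
--         elif n_right > 1:
--             counter += solve_just1s(right)      # pairs within
--         return counter
--
--     elif n_right == 0: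
--         counter += left.count(1)
--         if n_left == 2:
--             counter += (1 in left)
--         elif n_left > 1:
--             counter += solve_just1s(left)
--         return counter
--
--     else:
--         left_ones = left.count(1)
--         right_ones = right.count(1)
--         counter += left_ones + right_ones
--
--     if n_right > 1:
--         counter += solve_just1s(right)
--     if n_left > 1:
--         counter += solve_just1s(left)
--
--     left.sort()
--     right.sort()
--     if len(right) > 0:
--         for l in left:
--             if l * right[0] <= m:
--                 counter += 1
--             else:
--                 break
--
--             for r in right[1:]:
--                 if l * r <= m:
--                     counter += 1
--                 else:
--                     break
--
--     # if n_left > 0 and n_right > 0: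
--     #     counter += (left_ones * sum([k<=m for k in right]))
--     #     counter += (right_ones * sum([(k>1 and k<=m) for k in left]))
--
--     return counter
-- ===== SOURCE B (Python) =====
-- def _prefix_le(rs, l, m):
--     # rs sorted ascending: length of the longest prefix of rs with l*r <= m
--     if l > 0:
--         # l*r <= m  <=>  r <= m//l ; binary search for first element > m//l
--         q = m // l
--         lo, hi = 0, len(rs)
--         while lo < hi:
--             mid = (lo + hi) // 2
--             if rs[mid] <= q:
--                 lo = mid + 1
--             else:
--                 hi = mid
--         return lo
--     # l <= 0: l*r is non-increasing in r, so the prefix is all of rs or nothing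
--     return len(rs) if (not rs or l * rs[0] <= m) else 0
--
--
-- def solve_just1s(arr, m=None):
--     # iterative worklist instead of recursion; single-pass argmax; binary-search crossing count
--     total = 0
--     stack = [arr]
--     while stack:
--         sub = stack.pop()
--         mx, idx = sub[0], 0
--         for i in range(1, len(sub)):
--             if sub[i] > mx:
--                 mx, idx = sub[i], i
--         left, right = sub[:idx], sub[idx + 1:]
--         if not left or not right:
--             side = left or right
--             total += sum(x == 1 for x in side)
--             if len(side) == 2:
--                 total += 1 in side
--             elif len(side) > 1:
--                 stack.append(side)
--         else:
--             total += sum(x == 1 for x in left) + sum(x == 1 for x in right)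
--             if len(left) > 1:
--                 stack.append(left)
--             if len(right) > 1:
--                 stack.append(right)
--             sl, sr = sorted(left), sorted(right)
--             r0, rest = sr[0], sr[1:]
--             for l in sl:
--                 if l * r0 > mx:
--                     break
--                 total += 1 + _prefix_le(rest, l, mx)
--     return total
-- ===== Notes on version B (the rewrite author's own statement) =====
-- stated objective: alternative
-- what changed: B replaces A's recursion by an iterative worklist with an explicit stack and accumulator, finds the split point with a single-pass argmax instead of max()+index(), and counts crossing pairs with a binary search over the sorted right half instead of A's inner scan-with-break.
-- outside the precondition, e.g. on solve_just1s([], None): A raises ValueError, B raises IndexError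
import Mathlib
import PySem

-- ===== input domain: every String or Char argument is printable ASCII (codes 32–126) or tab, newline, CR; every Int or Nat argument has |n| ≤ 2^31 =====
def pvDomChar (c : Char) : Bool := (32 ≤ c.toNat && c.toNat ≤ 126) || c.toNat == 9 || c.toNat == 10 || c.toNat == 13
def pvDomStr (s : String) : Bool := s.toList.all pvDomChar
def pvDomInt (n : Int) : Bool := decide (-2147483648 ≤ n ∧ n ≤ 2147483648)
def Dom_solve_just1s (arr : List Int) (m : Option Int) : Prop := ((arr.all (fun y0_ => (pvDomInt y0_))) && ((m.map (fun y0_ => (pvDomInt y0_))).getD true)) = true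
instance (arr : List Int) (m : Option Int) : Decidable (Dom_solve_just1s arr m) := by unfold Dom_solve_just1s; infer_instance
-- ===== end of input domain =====

-- B replaces A's recursion by an iterative worklist (explicit stack) with an accumulator,
-- finds the split point with a single-pass argmax instead of max()+index(), and counts the
-- crossing pairs with a binary search over the sorted right half instead of A's inner
-- scan-with-break (objective: alternative; the recursion/slicing cost still dominates).

-- ===== PORT A =====
-- inner 'for r in right[1:]: if l*r <= m: counter += 1 else: break'
def pvInnerA (m l : Int) : List Int → Int
  | [] => 0
  | r :: rs => if l * r ≤ m then 1 + pvInnerA m l rs else 0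

-- outer 'for l in left: if l*right[0] <= m: counter += 1 else: break; for r in right[1:]: …'
def pvCrossA (m r0 : Int) (rest : List Int) : List Int → Int
  | [] => 0
  | l :: ls => if l * r0 ≤ m then 1 + pvInnerA m l rest + pvCrossA m r0 rest ls else 0

-- length facts cited by port A's termination proof
theorem pvLenLeft {arr : List Int} {mx : Int} {idx : Nat}
    (h : PySem.List.index? arr mx = some idx) :
    (PySem.List.slice arr none (some (idx : Int))).length < arr.length := by
  rw [PySem.List.index?_eq_some_iff] at h
  obtain ⟨pre, suf, rfl, rfl, -⟩ := h
  simp [PySem.List.slice_to_natCast]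

theorem pvLenRight {arr : List Int} (h : arr ≠ []) (idx : Nat) :
    (PySem.List.slice arr (some ((idx : Int) + 1)) none).length < arr.length := by
  have : ((idx : Int) + 1) = ((idx + 1 : Nat) : Int) := by push_cast; ring
  rw [this, PySem.List.slice_from_natCast]
  have := List.length_pos_iff.mpr h
  simp
  omega

def solve_just1s (arr : List Int) (m : Option Int) : Int :=
  match hmx : PySem.List.max? arr (fun x => x) with
  | none => 0                                     -- max([]) raises: excluded by Pre_
  | some mx =>
    match hidx : PySem.List.index? arr mx with
    | none => 0                                   -- unreachable: mx ∈ arr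
    | some idx =>
      let left := PySem.List.slice arr none (some (idx : Int))
      let right := PySem.List.slice arr (some ((idx : Int) + 1)) none
      if left.length = 0 then
        let c := (PySem.List.count right 1 : Int)
        if right.length = 2 then c + (if (1 : Int) ∈ right then 1 else 0)
        else if hr : right.length > 1 then c + solve_just1s right none
        else c
      else if right.length = 0 then
        let c := (PySem.List.count left 1 : Int)
        if left.length = 2 then c + (if (1 : Int) ∈ left then 1 else 0)
        else if hl : left.length > 1 then c + solve_just1s left none
        else c
      else
        let c0 := (PySem.List.count left 1 : Int) + (PySem.List.count right 1 : Int)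
        let c1 := if hr : right.length > 1 then c0 + solve_just1s right none else c0
        let c2 := if hl : left.length > 1 then c1 + solve_just1s left none else c1
        let sl := PySem.List.sorted left (fun x => x)
        let sr := PySem.List.sorted right (fun x => x)
        match sr with
        | [] => c2                                -- 'if len(right) > 0' guard
        | r0 :: rest => c2 + pvCrossA mx r0 rest sl
termination_by arr.length
decreasing_by
  · exact pvLenRight (by simpa [PySem.List.max?_eq_none_iff] using (by simp [hmx] : PySem.List.max? arr (fun x => x) ≠ none)) idx
  · exact pvLenLeft hidx
  · exact pvLenRight (by simpa [PySem.List.max?_eq_none_iff] using (by simp [hmx] : PySem.List.max? arr (fun x => x) ≠ none)) idx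
  · exact pvLenLeft hidx

-- ===== PORT B =====
-- hand-written binary search of Source B: first index in [lo, hi) whose element exceeds q
def pvBs (rs : List Int) (q : Int) (lo hi : Nat) : Nat :=
  if lo < hi then
    let mid := (lo + hi) / 2
    if rs.getD mid 0 ≤ q then pvBs rs q (mid + 1) hi else pvBs rs q lo mid
  else lo
termination_by hi - lo
decreasing_by all_goals omega

-- _prefix_le(rs, l, m) of Source B
def pvPrefB (rs : List Int) (l m : Int) : Int :=
  if 0 < l then (pvBs rs (PySem.Int.floordiv m l) 0 rs.length : Int)
  else
    match rs with
    | [] => (rs.length : Int)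
    | r :: _ => if l * r ≤ m then (rs.length : Int) else 0

-- 'for l in sl: if l * r0 > mx: break; total += 1 + _prefix_le(rest, l, mx)'
def pvCrossB (m r0 : Int) (rest : List Int) : List Int → Int
  | [] => 0
  | l :: ls => if l * r0 > m then 0 else 1 + pvPrefB rest l m + pvCrossB m r0 rest ls

-- 'for i in range(1, len(sub)): if sub[i] > mx: mx, idx = sub[i], i'
def pvArgmax : List Int → Int → Nat → Nat → Int × Nat
  | [], mx, idx, _ => (mx, idx)
  | x :: xs, mx, idx, i => if x > mx then pvArgmax xs x i (i + 1) else pvArgmax xs mx idx (i + 1)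

-- index bound cited by the worklist measure lemma below
theorem pvArgmax_lt : ∀ (xs : List Int) (mx : Int) (idx i : Nat), idx < i →
    (pvArgmax xs mx idx i).2 < i + xs.length := by
  intro xs
  induction xs with
  | nil => intro mx idx i h; simpa using h
  | cons x xs ih =>
    intro mx idx i h
    rw [pvArgmax]
    split
    · have := ih x i (i + 1) (by omega); simpa [Nat.add_comm, Nat.add_left_comm] using this
    · have := ih mx idx (i + 1) (by omega); simpa [Nat.add_comm, Nat.add_left_comm] using this

-- one iteration of Source B's while loop: the popped subarray's contribution and the lists pushed
-- (head of the returned list = next to be popped, matching Python's LIFO stack)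
def pvStep (sub : List Int) : Int × List (List Int) :=
  match sub with
  | [] => (0, [])                                 -- unreachable: the stack holds nonempty lists
  | x :: xs =>
    let p := pvArgmax xs x 0 1
    let mx := p.1
    let idx := p.2
    let left := sub.take idx
    let right := sub.drop (idx + 1)
    if left = [] ∨ right = [] then
      let side := if left = [] then right else left        -- Python 'left or right'
      let c := (side.map (fun y => if y == (1 : Int) then (1 : Int) else 0)).sum
      if side.length = 2 then (c + (if (1 : Int) ∈ side then 1 else 0), [])
      else if side.length > 1 then (c, [side])
      else (c, [])
    else
      let c := (left.map (fun y => if y == (1 : Int) then (1 : Int) else 0)).sum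
               + (right.map (fun y => if y == (1 : Int) then (1 : Int) else 0)).sum
      let pushes := (if right.length > 1 then [right] else [])
                    ++ (if left.length > 1 then [left] else [])
      let sl := PySem.List.sorted left (fun y => y)
      let sr := PySem.List.sorted right (fun y => y)
      match sr with
      | [] => (c, pushes)                         -- unreachable: right ≠ []
      | r0 :: rest => (c + pvCrossB mx r0 rest sl, pushes)

-- shape of the pushed-lists component, cited by the measure lemma and the step lemma below
theorem pvStep_snd (x : Int) (xs : List Int) :
    (pvStep (x :: xs)).2 =
      (if (x :: xs).take (pvArgmax xs x 0 1).2 = [] ∨ (x :: xs).drop ((pvArgmax xs x 0 1).2 + 1) = [] then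
        (if (if (x :: xs).take (pvArgmax xs x 0 1).2 = [] then (x :: xs).drop ((pvArgmax xs x 0 1).2 + 1) else (x :: xs).take (pvArgmax xs x 0 1).2).length = 2 then []
         else if (if (x :: xs).take (pvArgmax xs x 0 1).2 = [] then (x :: xs).drop ((pvArgmax xs x 0 1).2 + 1) else (x :: xs).take (pvArgmax xs x 0 1).2).length > 1 then [(if (x :: xs).take (pvArgmax xs x 0 1).2 = [] then (x :: xs).drop ((pvArgmax xs x 0 1).2 + 1) else (x :: xs).take (pvArgmax xs x 0 1).2)] else [])
      else
        (if ((x :: xs).drop ((pvArgmax xs x 0 1).2 + 1)).length > 1 then [(x :: xs).drop ((pvArgmax xs x 0 1).2 + 1)] else [])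
        ++ (if ((x :: xs).take (pvArgmax xs x 0 1).2).length > 1 then [(x :: xs).take (pvArgmax xs x 0 1).2] else [])) := by
  rw [pvStep]
  simp only []
  split
  · split
    · split
      · rfl
      · split <;> rfl
    · split
      · rfl
      · split <;> rfl
  · split <;> rfl

-- the worklist measure shrinks at every pop: cited by pvLoop's termination proof
theorem pvStep_measure (sub : List Int) :
    ((pvStep sub).2.map (fun s => 2 * s.length + 1)).sum < 2 * sub.length + 1 := by
  match sub with
  | [] => simp [pvStep]
  | x :: xs =>
    have hidx : (pvArgmax xs x 0 1).2 < xs.length + 1 := by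
      simpa [Nat.add_comm] using pvArgmax_lt xs x 0 1 (by omega)
    rw [pvStep_snd]
    set idx := (pvArgmax xs x 0 1).2 with hdef
    split
    · split
      · split
        · simp
        · split
          · simp <;> omega
          · simp
      · split
        · simp
        · split
          · simp [List.length_take] <;> omega
          · simp
    · rename_i hc
      push_neg at hc
      have h1 : 1 ≤ ((x :: xs).take idx).length := by
        rcases Nat.eq_zero_or_pos ((x :: xs).take idx).length with h | h
        · exact absurd (List.length_eq_zero_iff.mp h) hc.1
        · omega
      have h2 : 1 ≤ ((x :: xs).drop (idx + 1)).length := by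
        rcases Nat.eq_zero_or_pos ((x :: xs).drop (idx + 1)).length with h | h
        · exact absurd (List.length_eq_zero_iff.mp h) hc.2
        · omega
      have hl : ((x :: xs).take idx).length = idx := by
        simp [List.length_take]; omega
      have hr : ((x :: xs).drop (idx + 1)).length = xs.length - idx := by
        simp [List.length_drop]
      split <;> split <;> simp_all [List.length_take, List.length_drop] <;> omega

-- Source B's while loop, total as accumulator
def pvLoop (acc : Int) : List (List Int) → Int
  | [] => acc
  | sub :: stk => pvLoop (acc + (pvStep sub).1) ((pvStep sub).2 ++ stk)
termination_by stk => (stk.map (fun s => 2 * s.length + 1)).sum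
decreasing_by
  simp only [List.map_append, List.sum_append, List.map_cons, List.sum_cons]
  have := pvStep_measure sub
  omega

def solve_just1s_alt (arr : List Int) (m : Option Int) : Int :=
  pvLoop 0 [arr]

-- ===== PRECONDITION & SPEC =====
-- On the empty list Python A raises ValueError (max([])) and Python B raises IndexError; everywhere else both return.
def Pre_solve_just1s (arr : List Int) (m : Option Int) : Prop := arr ≠ []
instance (arr : List Int) (m : Option Int) : Decidable (Pre_solve_just1s arr m) := by unfold Pre_solve_just1s; infer_instance
def pvWitness_solve_just1s : List Int × Option Int := ([2, 1, 1, 3, -1], none)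

def Spec_solve_just1s (arr : List Int) (m : Option Int) (out : Int) : Prop := out = solve_just1s_alt arr m
instance (arr : List Int) (m : Option Int) (out : Int) : Decidable (Spec_solve_just1s arr m out) := by unfold Spec_solve_just1s; infer_instance

-- ===== CLAIM (what is proved, stated in full; the proofs are below) =====
def Claim_equal_solve_just1s : Prop := ∀ (arr : List Int) (m : Option Int), Dom_solve_just1s arr m → Pre_solve_just1s arr m → Spec_solve_just1s arr m (solve_just1s arr m)

-- ===== LEMMAS AND PROOFS =====

theorem pvInnerA_all (m l : Int) (rs : List Int) (h : ∀ r ∈ rs, l * r ≤ m) :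
    pvInnerA m l rs = (rs.length : Int) := by
  induction rs with
  | nil => rfl
  | cons r rest ih =>
    rw [pvInnerA, if_pos (h r (by simp))]
    rw [ih (fun r hr => h r (by simp [hr]))]
    simp; ring

theorem pvInnerA_pos (m l : Int) (hl : 0 < l) (rs : List Int) (hs : rs.Pairwise (· ≤ ·)) :
    pvInnerA m l rs = (rs.countP (fun r => decide (l * r ≤ m)) : Int) := by
  induction rs with
  | nil => rfl
  | cons r rest ih =>
    rw [pvInnerA, List.countP_cons]
    by_cases h : l * r ≤ m
    · rw [if_pos h, ih (List.Pairwise.of_cons hs)]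
      simp [h]; ring
    · rw [if_neg h]
      have hnone : rest.countP (fun r => decide (l * r ≤ m)) = 0 := by
        rw [List.countP_eq_zero]
        intro r' hr'
        have hrr : r ≤ r' := List.rel_of_pairwise_cons hs hr'
        simp only [decide_eq_true_eq]
        intro hc
        exact h (le_trans (by nlinarith) hc)
      simp [h, hnone]

theorem pvBs_spec (q : Int) (rs : List Int) (hs : rs.Pairwise (· ≤ ·)) :
    ∀ (fuel lo hi : Nat), hi - lo ≤ fuel → lo ≤ hi → hi ≤ rs.length →
    pvBs rs q lo hi = lo + ((rs.drop lo).take (hi - lo)).countP (fun r => decide (r ≤ q)) := by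
  have hmono : ∀ i j (hi_ : i < rs.length) (hj : j < rs.length), i ≤ j → rs[i] ≤ rs[j] := by
    intro i j hi_ hj hij
    rcases Nat.lt_or_ge i j with h | h
    · exact (List.pairwise_iff_getElem.mp hs) i j hi_ hj h
    · have : i = j := le_antisymm hij h
      subst this; rfl
  intro fuel
  induction fuel with
  | zero =>
    intro lo hi h1 h2 h3
    have : hi = lo := by omega
    subst this
    rw [pvBs, if_neg (by omega)]
    simp
  | succ fuel ih =>
    intro lo hi h1 h2 h3
    rw [pvBs]
    by_cases hlt : lo < hi
    · rw [if_pos hlt]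
      have hmid1 : lo ≤ (lo + hi) / 2 := by omega
      have hmid2 : (lo + hi) / 2 < hi := by omega
      have hmidlen : (lo + hi) / 2 < rs.length := by omega
      have hget : rs.getD ((lo + hi) / 2) 0 = rs[(lo + hi) / 2] := List.getD_eq_getElem rs 0 hmidlen
      have hsplit : ∀ k, lo ≤ k → k ≤ hi →
          (rs.drop lo).take (hi - lo) = ((rs.drop lo).take (k - lo)) ++ ((rs.drop k).take (hi - k)) := by
        intro k hk1 hk2
        have h4 : hi - lo = (k - lo) + (hi - k) := by omega
        rw [h4, List.take_add]
        congr 1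
        rw [List.drop_drop]
        have h5 : lo + (k - lo) = k := by omega
        rw [h5]
      by_cases hc : rs[(lo + hi) / 2] ≤ q
      · rw [if_pos (by rw [hget]; exact hc)]
        rw [ih ((lo + hi) / 2 + 1) hi (by omega) (by omega) h3]
        rw [hsplit ((lo + hi) / 2 + 1) (by omega) (by omega), List.countP_append]
        have hlen : ((rs.drop lo).take ((lo + hi) / 2 + 1 - lo)).length = (lo + hi) / 2 + 1 - lo := by
          simp; omega
        have hall' : ∀ x ∈ (rs.drop lo).take ((lo + hi) / 2 + 1 - lo), (fun r => decide (r ≤ q)) x = true := by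
          intro x hx
          rw [List.mem_iff_getElem] at hx
          obtain ⟨j, hj, rfl⟩ := hx
          rw [hlen] at hj
          have hj2 : lo + j < rs.length := by omega
          have : ((rs.drop lo).take ((lo + hi) / 2 + 1 - lo))[j]'(by rw [hlen]; exact hj) = rs[lo + j]'hj2 := by
            simp [List.getElem_take, List.getElem_drop]
          rw [this]
          simp only [decide_eq_true_eq]
          exact le_trans (hmono (lo + j) ((lo + hi) / 2) hj2 hmidlen (by omega)) hc
        rw [List.countP_eq_length.mpr hall', hlen]
        omega
      · rw [if_neg (by rw [hget]; exact hc)]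
        rw [ih lo ((lo + hi) / 2) (by omega) (by omega) (by omega)]
        rw [hsplit ((lo + hi) / 2) (by omega) (by omega), List.countP_append]
        have hzero : ((rs.drop ((lo + hi) / 2)).take (hi - (lo + hi) / 2)).countP (fun r => decide (r ≤ q)) = 0 := by
          rw [List.countP_eq_zero]
          intro x hx
          rw [List.mem_iff_getElem] at hx
          obtain ⟨j, hj, rfl⟩ := hx
          have hjlen : ((rs.drop ((lo + hi) / 2)).take (hi - (lo + hi) / 2)).length = hi - (lo + hi) / 2 := by
            simp; omega
          rw [hjlen] at hj
          have hj2 : (lo + hi) / 2 + j < rs.length := by omega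
          have : ((rs.drop ((lo + hi) / 2)).take (hi - (lo + hi) / 2))[j]'(by rw [hjlen]; exact hj) = rs[(lo + hi) / 2 + j]'hj2 := by
            simp [List.getElem_take, List.getElem_drop]
          rw [this]
          simp only [decide_eq_true_eq, not_le]
          exact lt_of_lt_of_le (lt_of_not_ge hc) (hmono ((lo + hi) / 2) ((lo + hi) / 2 + j) hmidlen hj2 (by omega))
        rw [hzero]
        omega
    · rw [if_neg hlt]
      have : hi = lo := by omega
      subst this
      simp

theorem pvPrefB_eq_innerA (m l : Int) (rs : List Int) (hs : rs.Pairwise (· ≤ ·)) :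
    pvPrefB rs l m = pvInnerA m l rs := by
  rw [pvPrefB.eq_def]
  by_cases hl : 0 < l
  · rw [if_pos hl]
    rw [pvBs_spec (PySem.Int.floordiv m l) rs hs rs.length 0 rs.length (by omega) (by omega) le_rfl]
    simp only [List.drop_zero, Nat.sub_zero, List.take_length]
    rw [pvInnerA_pos m l hl rs hs]
    have hcong : rs.countP (fun r => decide (r ≤ PySem.Int.floordiv m l))
        = rs.countP (fun r => decide (l * r ≤ m)) := by
      apply List.countP_congr
      intro r _
      simp only [decide_eq_true_eq]
      rw [PySem.Int.le_floordiv_iff_mul_le hl, mul_comm]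
    rw [hcong]
    push_cast
    ring
  · rw [if_neg hl]
    match rs with
    | [] => rfl
    | r :: rest =>
      show (if l * r ≤ m then ((r :: rest).length : Int) else 0) = pvInnerA m l (r :: rest)
      by_cases h : l * r ≤ m
      · rw [if_pos h]
        rw [pvInnerA_all m l (r :: rest) ?_]
        intro r' hr'
        rcases List.mem_cons.mp hr' with rfl | hr'
        · exact h
        · have hrr : r ≤ r' := List.rel_of_pairwise_cons hs hr'
          have : l * r' ≤ l * r := by nlinarith [le_of_not_gt hl]
          exact le_trans this h
      · rw [if_neg h, pvInnerA, if_neg h]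

theorem pvCross_eq (m r0 : Int) (rest : List Int) (hs : rest.Pairwise (· ≤ ·)) :
    ∀ sl : List Int, pvCrossA m r0 rest sl = pvCrossB m r0 rest sl := by
  intro sl
  induction sl with
  | nil => rfl
  | cons l ls ih =>
    rw [pvCrossA, pvCrossB]
    by_cases h : l * r0 ≤ m
    · rw [if_pos h, if_neg (not_lt_of_ge h), ih, pvPrefB_eq_innerA m l rest hs]
    · rw [if_neg h, if_pos (lt_of_not_ge h)]

theorem pvCount_sum (xs : List Int) :
    (PySem.List.count xs 1 : Int) = (xs.map (fun x => if x == (1 : Int) then (1 : Int) else 0)).sum := by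
  rw [PySem.List.count_eq, PySem.List.sum_map_ite_one_zero (fun x => x == (1 : Int)) xs]
  simp [List.count]

-- the same count identity in the normal form simp leaves behind
theorem pvCount_sum' (xs : List Int) :
    (List.map (fun y => if y = 1 then (1 : Int) else 0) xs).sum = (List.count 1 xs : Int) := by
  induction xs with
  | nil => simp
  | cons a t ih =>
    simp only [List.map_cons, List.sum_cons, List.count_cons, ih]
    by_cases ha : a = 1 <;> simp [ha] <;> push_cast <;> ring

theorem pv_argmax_spec : ∀ (xs pre : List Int) (mx : Int) (idx : Nat),
    PySem.List.max? pre (fun y => y) = some mx →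
    PySem.List.index? pre mx = some idx →
    PySem.List.max? (pre ++ xs) (fun y => y) = some (pvArgmax xs mx idx pre.length).1 ∧
    PySem.List.index? (pre ++ xs) (pvArgmax xs mx idx pre.length).1 = some (pvArgmax xs mx idx pre.length).2 := by
  intro xs
  induction xs with
  | nil =>
    intro pre mx idx h1 h2
    simpa [pvArgmax] using ⟨h1, h2⟩
  | cons y ys ih =>
    intro pre mx idx h1 h2
    have hmem : mx ∈ pre := PySem.List.max?_mem h1
    have hmax : ∀ z ∈ pre, z ≤ mx := fun z hz => PySem.List.max?_isMax h1 z hz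
    obtain ⟨p, ps, rfl⟩ : ∃ p ps, pre = p :: ps := by
      cases pre with
      | nil => simp at hmem
      | cons p ps => exact ⟨p, ps, rfl⟩
    have hfold : List.foldl max p ps = mx := by
      rw [PySem.List.max?_id_cons] at h1
      exact Option.some.inj h1
    have hcons : (p :: ps) ++ (y :: ys) = ((p :: ps) ++ [y]) ++ ys := by simp
    rw [pvArgmax]
    split
    · rename_i hy
      have hm' : PySem.List.max? ((p :: ps) ++ [y]) (fun z => z) = some y := by
        rw [show (p :: ps) ++ [y] = p :: (ps ++ [y]) from rfl, PySem.List.max?_id_cons,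
          List.foldl_append, hfold]
        simp [max_eq_right (le_of_lt hy)]
      have hnotmem : y ∉ (p :: ps) := fun hmem' => absurd (hmax y hmem') (not_le.mpr hy)
      have hi' : PySem.List.index? ((p :: ps) ++ [y]) y = some ((p :: ps).length) :=
        PySem.List.index?_append_singleton_self (p :: ps) y hnotmem
      have := ih ((p :: ps) ++ [y]) y (p :: ps).length hm' hi'
      rw [hcons]
      simpa [List.length_append] using this
    · rename_i hy
      have hm' : PySem.List.max? ((p :: ps) ++ [y]) (fun z => z) = some mx := by
        rw [show (p :: ps) ++ [y] = p :: (ps ++ [y]) from rfl, PySem.List.max?_id_cons,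
          List.foldl_append, hfold]
        simp [max_eq_left (le_of_not_gt hy)]
      have hi' : PySem.List.index? ((p :: ps) ++ [y]) mx = some idx := by
        rw [PySem.List.index?_append_of_mem [y] hmem]; exact h2
      have := ih ((p :: ps) ++ [y]) mx idx hm' hi'
      rw [hcons]
      simpa [List.length_append] using this

theorem pv_step_eq (sub : List Int) :
    (pvStep sub).1 + (((pvStep sub).2.map (fun s => solve_just1s s none)).sum) = solve_just1s sub none := by
  match sub with
  | [] =>
    rw [solve_just1s.eq_def]
    simp only [pvStep]
    split <;> rfl
  | x :: xs =>
    obtain ⟨hM, hI⟩ := pv_argmax_spec xs [x] x 0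
      (by rw [PySem.List.max?_id_cons]; rfl) (PySem.List.index?_cons_self x [])
    simp only [List.singleton_append, List.length_singleton] at hM hI
    conv_rhs => rw [solve_just1s.eq_def]
    split
    · rename_i h
      rw [hM] at h
      cases h
    · rename_i mx h
      rw [hM] at h
      injection h with h
      subst h
      split
      · rename_i h2
        rw [hI] at h2
        cases h2
      · rename_i idx h2
        rw [hI] at h2
        injection h2 with h2
        subst h2
        have e1 : PySem.List.slice (x :: xs) none (some ((pvArgmax xs x 0 1).2 : Int))
            = (x :: xs).take (pvArgmax xs x 0 1).2 := PySem.List.slice_to_natCast _ _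
        have e2 : PySem.List.slice (x :: xs) (some (((pvArgmax xs x 0 1).2 : Int) + 1)) none
            = (x :: xs).drop ((pvArgmax xs x 0 1).2 + 1) := by
          have hc : (((pvArgmax xs x 0 1).2 : Int) + 1) = (((pvArgmax xs x 0 1).2 + 1 : Nat) : Int) := by
            push_cast; ring
          rw [hc, PySem.List.slice_from_natCast]
        rw [pvStep]
        simp only [e1, e2]
        set L := (x :: xs).take (pvArgmax xs x 0 1).2 with hLdef
        set R := (x :: xs).drop ((pvArgmax xs x 0 1).2 + 1) with hRdef
        by_cases hLe : L = []
        · by_cases h2 : R.length = 2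
          · simp [hLe, h2, pvCount_sum']
          · by_cases h1 : R.length > 1
            · simp [hLe, h2, h1, pvCount_sum']
            · simp [hLe, h2, h1, pvCount_sum']
        · have hLlen : ¬ L.length = 0 := by simpa [List.length_eq_zero_iff] using hLe
          by_cases hRe : R = []
          · by_cases h2 : L.length = 2
            · simp [hLe, hRe, h2, pvCount_sum']
            · by_cases h1 : L.length > 1
              · simp [hLe, hRe, hLlen, h2, h1, pvCount_sum']
              · simp [hLe, hRe, hLlen, h2, h1, pvCount_sum']
          · have hRlen : ¬ R.length = 0 := by simpa [List.length_eq_zero_iff] using hRe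
            rw [if_neg (show ¬ (L = [] ∨ R = []) from by simp [hLe, hRe]),
              if_neg hLlen, if_neg hRlen]
            rw [pvCount_sum L, pvCount_sum R]
            have hpush : (((if R.length > 1 then [R] else []) ++ (if L.length > 1 then [L] else [])).map
                (fun s => solve_just1s s none)).sum
                = (if R.length > 1 then solve_just1s R none else 0)
                  + (if L.length > 1 then solve_just1s L none else 0) := by
              by_cases hR1 : R.length > 1 <;> by_cases hL1 : L.length > 1 <;>
                simp [hR1, hL1]
            cases hs : PySem.List.sorted R (fun y => y) with
            | nil =>
              simp only [hpush]
              by_cases hR1 : R.length > 1 <;> by_cases hL1 : L.length > 1 <;>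
                simp [hR1, hL1, pvCount_sum'] <;> ring
            | cons r0 rest =>
              have hpw : rest.Pairwise (· ≤ ·) := by
                have hp := PySem.List.sorted_pairwise R (fun y => y)
                rw [hs] at hp
                exact List.Pairwise.of_cons hp
              have hcr := pvCross_eq (pvArgmax xs x 0 1).1 r0 rest hpw
                (PySem.List.sorted L (fun y => y))
              simp only [hpush, ← hcr]
              by_cases hR1 : R.length > 1 <;> by_cases hL1 : L.length > 1 <;>
                simp [hR1, hL1, pvCount_sum'] <;> ring

theorem pv_loop_sum : ∀ (n : Nat) (stk : List (List Int)), ((stk.map (fun s => 2 * s.length + 1)).sum) ≤ n →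
    ∀ acc, pvLoop acc stk = acc + ((stk.map (fun s => solve_just1s s none)).sum) := by
  intro n
  induction n with
  | zero =>
    intro stk h acc
    cases stk with
    | nil => simp [pvLoop]
    | cons sub t => exfalso; simp [List.sum_cons] at h
  | succ n ih =>
    intro stk h acc
    cases stk with
    | nil => simp [pvLoop]
    | cons sub t =>
      rw [pvLoop]
      have hm := pvStep_measure sub
      have hle : (((pvStep sub).2 ++ t).map (fun s => 2 * s.length + 1)).sum ≤ n := by
        simp only [List.map_append, List.sum_append]
        simp only [List.map_cons, List.sum_cons] at h
        omega
      rw [ih _ hle]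
      simp only [List.map_append, List.sum_append, List.map_cons, List.sum_cons]
      have hs := pv_step_eq sub
      omega

-- A never reads its parameter m (the Python rebinds it at once)
theorem pv_solve_irrel (arr : List Int) (m : Option Int) : solve_just1s arr m = solve_just1s arr none := by
  conv_lhs => rw [solve_just1s.eq_def]
  conv_rhs => rw [solve_just1s.eq_def]

theorem pv_main (arr : List Int) (m : Option Int) : solve_just1s arr m = solve_just1s_alt arr m := by
  rw [solve_just1s_alt]
  rw [pv_loop_sum (([arr].map (fun s => 2 * s.length + 1)).sum) [arr] le_rfl 0]
  simp [pv_solve_irrel arr m]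

-- ===== VERDICT (by name: the statement is the Claim_ definition above) =====
theorem solve_just1s_spec : Claim_equal_solve_just1s := by
  intro arr m _ _
  unfold Spec_solve_just1s
  exact pv_main arr m
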